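-- pv_equiv track=rewrite | github.com/nazgul735/easyAlgorithms | minNumOfDistinct.py | distinctIds
-- ===== SOURCE A (Python) =====
-- def distinctIds(arr, mi):
--     n = len(arr)
--     m = {}
--     v = []
--     count = 0
--
--     # Store the occurrence of ids
--     for i in range(n):
--         if arr[i] in m:
--             m[arr[i]] += 1
--
--         else:
--             m[arr[i]] = 1
--
--
--
--
--     # Store into the list value as key and vice-versa
--     for i in m:
--         v.append([m[i],i]) #value=i and m[i]=key --> sort will set value first
--     v.sort()
--     size = len(v)
--
--
--     # Start removing elements from the beginning
--     for i in range(size):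
--     # Remove if current value is less than
--     # or equal to mi
--         if (v[i][0] <= mi):
--             mi -= v[i][0]
--             count += 1
--
--
--         else:   # Return the remaining size
--             return size - count
--     return size - count
-- ===== SOURCE B (Python) =====
-- def distinctIds(arr, mi):
--     # Bucket-by-frequency sweep instead of sorting [freq, id] pairs.
--     counts = {}
--     for x in arr:
--         counts[x] = counts.get(x, 0) + 1
--     size = len(counts)
--     vals = list(counts.values())
--     maxf = 0
--     for f in vals:
--         if maxf < f:
--             maxf = f
--     bucket = {}
--     for f in vals:
--         bucket[f] = bucket.get(f, 0) + 1
--     count = 0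
--     for f in range(1, maxf + 1):
--         for _ in range(bucket.get(f, 0)):
--             if f <= mi:
--                 mi -= f
--                 count += 1
--             else:
--                 return size - count
--     return size - count
-- ===== Notes on version B (the rewrite author's own statement) =====
-- stated objective: faster
-- what changed: B replaces A's build-and-lexicographically-sort of [freq,id] pairs by a counting-sort style frequency bucket table swept over f = 1..max_freq, spending the budget per bucket with the same early return.
import Mathlib
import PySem

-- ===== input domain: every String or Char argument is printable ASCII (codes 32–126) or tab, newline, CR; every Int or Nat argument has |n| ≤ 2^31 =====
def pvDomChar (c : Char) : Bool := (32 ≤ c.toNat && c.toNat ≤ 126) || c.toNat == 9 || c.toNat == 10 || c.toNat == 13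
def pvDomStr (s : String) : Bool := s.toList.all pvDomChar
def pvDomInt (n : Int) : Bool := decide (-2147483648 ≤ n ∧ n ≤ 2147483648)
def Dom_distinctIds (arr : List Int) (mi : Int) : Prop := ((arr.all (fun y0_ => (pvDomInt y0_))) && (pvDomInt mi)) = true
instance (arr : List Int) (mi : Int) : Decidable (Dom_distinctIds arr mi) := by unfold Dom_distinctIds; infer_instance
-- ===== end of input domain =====

-- B replaces A's lexicographic sort of [freq, id] pairs by a counting-sort style
-- frequency-bucket sweep over f = 1..max_freq (objective: faster; measured).

-- ===== PORT A =====
-- step of A's counting loop: 'if arr[i] in m: m[arr[i]] += 1 else: m[arr[i]] = 1'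
def pvAStep (d : PySem.Dict Int Int) (x : Int) : PySem.Dict Int Int :=
  if d.contains x then d.modify x 0 (· + 1) else d.insert x 1

-- A's final 'for i in range(size)' loop with its early return, over the sorted list
def pvALoop (v : List (Int × Int)) (size : Int) (mi count : Int) : Int :=
  match v with
  | [] => size - count
  | p :: rest => if p.1 ≤ mi then pvALoop rest size (mi - p.1) (count + 1) else size - count

def distinctIds (arr : List Int) (mi : Int) : Int :=
  let n := PySem.List.len arr
  let m := (PySem.List.pyRange 0 n 1).foldl
    (fun d i => pvAStep d (PySem.List.pyGetD arr i 0)) PySem.Dict.empty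
  let v := m.keys.foldl (fun acc k => acc ++ [(m.getD k 0, k)]) ([] : List (Int × Int))
  let vs := PySem.List.sorted2 v (·.1) (·.2)   -- v.sort(): Python's lexicographic pair order
  let size := PySem.List.len vs
  pvALoop vs size mi 0

-- ===== PORT B =====
-- inner 'for _ in range(bucket.get(f, 0))' loop; Sum.inr c signals the early return
def pvBInner (f : Int) : Nat → Int × Int → (Int × Int) ⊕ Int
  | 0, st => Sum.inl st
  | Nat.succ k, st => if f ≤ st.1 then pvBInner f k (st.1 - f, st.2 + 1) else Sum.inr st.2

-- outer 'for f in range(1, maxf + 1)' sweep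
def pvBSweep (bucket : PySem.Dict Int Int) : List Int → Int × Int → (Int × Int) ⊕ Int
  | [], st => Sum.inl st
  | f :: rest, st =>
    match pvBInner f (bucket.getD f 0).toNat st with
    | Sum.inl st' => pvBSweep bucket rest st'
    | Sum.inr c => Sum.inr c

def distinctIds_alt (arr : List Int) (mi : Int) : Int :=
  let counts := arr.foldl (fun d x => d.insert x (d.getD x 0 + 1)) PySem.Dict.empty
  let size : Int := (counts.size : Int)
  let vals := counts.values
  let maxf := vals.foldl (fun acc f => if acc < f then f else acc) 0
  let bucket := vals.foldl (fun d f => d.insert f (d.getD f 0 + 1)) PySem.Dict.empty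
  match pvBSweep bucket (PySem.List.pyRange 1 (maxf + 1) 1) (mi, 0) with
  | Sum.inl st => size - st.2
  | Sum.inr c => size - c

-- ===== PRECONDITION & SPEC =====
def Spec_distinctIds (arr : List Int) (mi : Int) (out : Int) : Prop := out = distinctIds_alt arr mi
instance (arr : List Int) (mi : Int) (out : Int) : Decidable (Spec_distinctIds arr mi out) := by unfold Spec_distinctIds; infer_instance

-- ===== CLAIM (what is proved, stated in full; the proofs are below) =====
def Claim_equal_distinctIds : Prop := ∀ (arr : List Int) (mi : Int), Dom_distinctIds arr mi → Spec_distinctIds arr mi (distinctIds arr mi)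

-- ===== LEMMAS AND PROOFS =====

-- the common greedy spec: number of affordable prefix elements, added to count
def pvGo : List Int → Int → Int → Int
  | [], _, count => count
  | f :: r, mi, count => if f ≤ mi then pvGo r (mi - f) (count + 1) else count

theorem pvALoop_eq_go (v : List (Int × Int)) (size : Int) :
    ∀ mi count, pvALoop v size mi count = size - pvGo (v.map Prod.fst) mi count := by
  induction v with
  | nil => intro mi count; simp [pvALoop, pvGo]
  | cons p rest ih =>
    intro mi count
    simp only [pvALoop, pvGo, List.map_cons]
    split_ifs with h
    · exact ih _ _
    · rfl

def pvRes : (Int × Int) ⊕ Int → Int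
  | Sum.inl st => st.2
  | Sum.inr c => c

theorem pvBInner_eq_go (f : Int) :
    ∀ (n : Nat) (st : Int × Int) (k : List Int),
      (match pvBInner f n st with
       | Sum.inl st' => pvGo k st'.1 st'.2
       | Sum.inr c => c) = pvGo (List.replicate n f ++ k) st.1 st.2 := by
  intro n
  induction n with
  | zero => intro st k; simp [pvBInner]
  | succ m ih =>
    intro st k
    simp only [pvBInner, List.replicate_succ, List.cons_append, pvGo]
    split_ifs with h
    · exact ih _ _
    · rfl

theorem pvBSweep_eq_go (bucket : PySem.Dict Int Int) :
    ∀ (fs : List Int) (st : Int × Int),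
      pvRes (pvBSweep bucket fs st)
        = pvGo (fs.flatMap (fun f => List.replicate (bucket.getD f 0).toNat f)) st.1 st.2 := by
  intro fs
  induction fs with
  | nil => intro st; simp [pvBSweep, pvRes, pvGo]
  | cons f rest ih =>
    intro st
    simp only [pvBSweep, List.flatMap_cons]
    rw [← pvBInner_eq_go f (bucket.getD f 0).toNat st
        (rest.flatMap (fun f => List.replicate (bucket.getD f 0).toNat f))]
    cases h : pvBInner f (bucket.getD f 0).toNat st with
    | inl st' => simpa [pvRes] using ih st'
    | inr c => simp [pvRes]

-- A's dict-building step is Counter's step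
theorem pvAStep_eq_modify (d : PySem.Dict Int Int) (x : Int) :
    pvAStep d x = d.modify x 0 (· + 1) := by
  unfold pvAStep
  by_cases h : d.contains x = true
  · simp [h]
  · simp only [Bool.not_eq_true] at h
    simp [h, PySem.Dict.modify, PySem.Dict.getD_of_not_contains d 0 h]

-- count of x in the bucket-sweep's flattened list
theorem pvCountFlat (n : Int → Nat) :
    ∀ (k : Nat) (a b x : Int), (b - a).toNat = k →
      (((PySem.List.pyRange a b 1).flatMap (fun f => List.replicate (n f) f)).count x)
        = if a ≤ x ∧ x < b then n x else 0 := by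
  intro k
  induction k with
  | zero =>
    intro a b x hk
    have hba : b ≤ a := by omega
    simp [PySem.List.pyRange_one_eq_nil hba]
    omega
  | succ m ih =>
    intro a b x hk
    have hab : a < b := by omega
    rw [PySem.List.pyRange_one_cons hab]
    simp only [List.flatMap_cons, List.count_append, List.count_replicate]
    rw [ih (a + 1) b x (by omega)]
    by_cases hxa : x = a
    · subst hxa
      simp only [beq_self_eq_true, if_true]
      split_ifs <;> omega
    · have hax : (a == x) = false := by simp [Ne.symm hxa]
      simp only [hax, Bool.false_eq_true, if_false, Nat.zero_add]
      by_cases hc : a ≤ x ∧ x < b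
      · rw [if_pos hc, if_pos (by omega)]
      · rw [if_neg hc, if_neg (by omega)]

-- every element of the flattened list is ≥ its range start; pairwise-sorted
theorem pvPairwiseFlat (n : Int → Nat) :
    ∀ (k : Nat) (a b : Int), (b - a).toNat = k →
      List.Pairwise (· ≤ ·) ((PySem.List.pyRange a b 1).flatMap (fun f => List.replicate (n f) f)) := by
  intro k
  induction k with
  | zero =>
    intro a b hk
    have hba : b ≤ a := by omega
    simp [PySem.List.pyRange_one_eq_nil hba]
  | succ m ih =>
    intro a b hk
    have hab : a < b := by omega
    rw [PySem.List.pyRange_one_cons hab]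
    simp only [List.flatMap_cons]
    rw [List.pairwise_append]
    refine ⟨?_, ih (a + 1) b (by omega), ?_⟩
    · rw [List.pairwise_replicate]; right; exact le_refl a
    · intro x hx y hy
      have hxa : x = a := List.eq_of_mem_replicate hx
      rcases List.mem_flatMap.mp hy with ⟨f, hf, hyf⟩
      have hya : y = f := List.eq_of_mem_replicate hyf
      have : a + 1 ≤ f := (PySem.List.mem_pyRange_one.mp hf).1
      omega

-- insertBy with a fst-monotone comparator preserves fst-sortedness
theorem pvInsertBy_pairwise (before : Int × Int → Int × Int → Bool)
    (hT : ∀ a b, before a b = true → a.1 ≤ b.1)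
    (hF : ∀ a b, before a b = false → b.1 ≤ a.1) (x : Int × Int) :
    ∀ (ys : List (Int × Int)), List.Pairwise (fun p q => p.1 ≤ q.1) ys →
      List.Pairwise (fun p q => p.1 ≤ q.1) (PySem.List.insertBy before x ys) := by
  intro ys
  induction ys with
  | nil => intro _; simp [PySem.List.insertBy]
  | cons y ys ih =>
    intro hpw
    rw [List.pairwise_cons] at hpw
    obtain ⟨hy, hys⟩ := hpw
    simp only [PySem.List.insertBy]
    split_ifs with hb
    · refine List.pairwise_cons.mpr ⟨?_, List.pairwise_cons.mpr ⟨hy, hys⟩⟩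
      intro z hz
      rcases List.mem_cons.mp hz with h | h
      · subst h; exact hT _ _ hb
      · exact le_trans (hT _ _ hb) (hy z h)
    · refine List.pairwise_cons.mpr ⟨?_, ih hys⟩
      intro z hz
      rcases (PySem.List.mem_insertBy before x z ys).mp hz with h | h
      · subst h; exact hF _ _ (by simpa using hb)
      · exact hy z h

theorem pvFoldl_insertBy_pairwise (before : Int × Int → Int × Int → Bool)
    (hT : ∀ a b, before a b = true → a.1 ≤ b.1)
    (hF : ∀ a b, before a b = false → b.1 ≤ a.1) :
    ∀ (xs acc : List (Int × Int)), List.Pairwise (fun p q => p.1 ≤ q.1) acc →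
      List.Pairwise (fun p q => p.1 ≤ q.1)
        (xs.foldl (fun acc x => PySem.List.insertBy before x acc) acc) := by
  intro xs
  induction xs with
  | nil => intro acc h; simpa using h
  | cons x xs ih =>
    intro acc h
    simp only [List.foldl_cons]
    exact ih _ (pvInsertBy_pairwise before hT hF x acc h)

-- sorted2 by (fst, snd) is fst-sorted
theorem pvSorted2_pairwise_fst (v : List (Int × Int)) :
    List.Pairwise (fun p q : Int × Int => p.1 ≤ q.1) (PySem.List.sorted2 v (·.1) (·.2)) := by
  unfold PySem.List.sorted2
  simp only [if_neg (by decide : ¬ (false = true))]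
  apply pvFoldl_insertBy_pairwise
  · intro a b hb
    simp only [Bool.or_eq_true, Bool.and_eq_true, decide_eq_true_eq, Bool.not_eq_true',
      decide_eq_false_iff_not] at hb
    rcases hb with h | ⟨h, _⟩ <;> omega
  · intro a b hb
    simp only [Bool.or_eq_false_iff, decide_eq_false_iff_not] at hb
    omega
  · exact List.Pairwise.nil

-- the single master lemma: both ports compute size - pvGo (sorted frequency list) mi 0
theorem pvMain (arr : List Int) (mi : Int) : distinctIds arr mi = distinctIds_alt arr mi := by
  -- shared data
  set S := PySem.Set.ofList arr with hS
  set vals : List Int := S.map (fun k => (arr.count k : Int)) with hvals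
  -- ===== A side =====
  have hm : (PySem.List.pyRange 0 (PySem.List.len arr) 1).foldl
      (fun d i => pvAStep d (PySem.List.pyGetD arr i 0)) PySem.Dict.empty
      = PySem.Dict.counter arr := by
    rw [PySem.List.len_eq, PySem.List.foldl_pyRange_zero_pyGetD' arr 0 pvAStep PySem.Dict.empty]
    have hcong := PySem.List.foldl_congr_mem (l := arr) (init := PySem.Dict.empty)
      (f := pvAStep) (g := fun (d : PySem.Dict Int Int) (x : Int) => d.modify x 0 (· + 1))
      (by intro acc x _; exact pvAStep_eq_modify acc x)
    rw [hcong]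
    rfl
  have hv : (PySem.Dict.counter arr).keys.foldl
      (fun acc k => acc ++ [((PySem.Dict.counter arr).getD k 0, k)]) ([] : List (Int × Int))
      = S.map (fun k => ((arr.count k : Int), k)) := by
    rw [PySem.List.foldl_append_singleton_eq_map]
    rw [PySem.Dict.keys_counter]
    simp only [List.nil_append]
    exact List.map_congr_left (fun k _ => by rw [PySem.Dict.getD_counter])
  set v : List (Int × Int) := S.map (fun k => ((arr.count k : Int), k)) with hvdef
  set vsorted := PySem.List.sorted2 v (·.1) (·.2) with hvs
  have hA : distinctIds arr mi
      = (vsorted.length : Int) - pvGo (vsorted.map Prod.fst) mi 0 := by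
    unfold distinctIds
    simp only [hm, hv]
    rw [← hvs, pvALoop_eq_go, PySem.List.len_eq]
  -- ===== B side =====
  have hcounts : arr.foldl (fun d x => d.insert x (d.getD x 0 + 1)) PySem.Dict.empty
      = PySem.Dict.counter arr := PySem.Dict.foldl_insert_getD_add_one_eq_counter arr
  have hvalsEq : (PySem.Dict.counter arr).values = vals := by
    show ((PySem.Dict.counter arr).items).map (·.2) = vals
    rw [PySem.Dict.items_counter]
    simp [hvals, hS]
  have hsize : ((PySem.Dict.counter arr).size : Int) = (S.length : Int) := by
    show (((PySem.Dict.counter arr).items).length : Int) = _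
    rw [PySem.Dict.items_counter]
    simp [hS]
  set maxf := vals.foldl (fun acc f => if acc < f then f else acc) 0 with hmaxf
  have hbucket : vals.foldl (fun d f => d.insert f (d.getD f 0 + 1)) PySem.Dict.empty
      = PySem.Dict.counter vals := PySem.Dict.foldl_insert_getD_add_one_eq_counter vals
  set L2 := (PySem.List.pyRange 1 (maxf + 1) 1).flatMap
      (fun f => List.replicate (vals.count f) f) with hL2
  have hB : distinctIds_alt arr mi = (S.length : Int) - pvGo L2 mi 0 := by
    unfold distinctIds_alt
    simp only [hcounts, hvalsEq, hsize, ← hmaxf, hbucket]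
    have hres : ∀ r : (Int × Int) ⊕ Int,
        (match r with
         | Sum.inl st => (S.length : Int) - st.2
         | Sum.inr c => (S.length : Int) - c) = (S.length : Int) - pvRes r := by
      intro r; cases r <;> rfl
    rw [hres]
    rw [pvBSweep_eq_go]
    have : (fun f => List.replicate ((PySem.Dict.counter vals).getD f 0).toNat f)
        = fun f => List.replicate (vals.count f) f := by
      funext f; rw [PySem.Dict.getD_counter]; simp
    rw [this, ← hL2]
  -- ===== the two frequency lists coincide =====
  -- max bound on vals
  have hmaxEq : maxf = vals.foldl (fun acc y => max acc y) 0 := by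
    rw [hmaxf]
    exact PySem.List.foldl_congr_mem (l := vals) (init := (0 : Int))
      (f := fun acc f => if acc < f then f else acc) (g := fun acc y => max acc y)
      (by intro acc y _; simp only [max_def]; split_ifs <;> omega)
  have hmax : ∀ x ∈ vals, x ≤ maxf := by
    intro x hx
    rw [hmaxEq]
    exact (PySem.List.le_foldl_max_int vals (fun y => y) 0).2 x hx
  have hpos : ∀ x ∈ vals, 1 ≤ x := by
    intro x hx
    rw [hvals] at hx
    rcases List.mem_map.mp hx with ⟨k, hk, rfl⟩
    rw [PySem.Set.mem_ofList] at hk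
    have : 1 ≤ arr.count k := List.one_le_count_iff.mpr hk
    exact_mod_cast this
  -- L2 is a permutation of vals
  have hpermL2 : L2.Perm vals := by
    rw [List.perm_iff_count]
    intro x
    rw [hL2, pvCountFlat (fun f => vals.count f) (maxf + 1 - 1).toNat 1 (maxf + 1) x rfl]
    by_cases hx : 1 ≤ x ∧ x < maxf + 1
    · simp [hx]
    · rw [if_neg hx]
      by_cases hmem : x ∈ vals
      · exact absurd ⟨hpos x hmem, by have := hmax x hmem; omega⟩ hx
      · simp [List.count_eq_zero_of_not_mem hmem]
  have hpwL2 : List.Pairwise (· ≤ ·) L2 :=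
    pvPairwiseFlat (fun f => vals.count f) (maxf + 1 - 1).toNat 1 (maxf + 1) rfl
  -- L1 := map fst of the sorted pair list
  have hpermL1 : (vsorted.map Prod.fst).Perm vals := by
    have h1 : vsorted.Perm v := PySem.List.sorted2_perm v (·.1) (·.2) false
    have h2 := h1.map Prod.fst
    have : v.map Prod.fst = vals := by
      rw [hvdef, hvals, List.map_map]; rfl
    rwa [this] at h2
  have hpwL1 : List.Pairwise (· ≤ ·) (vsorted.map Prod.fst) :=
    List.pairwise_map.mpr (pvSorted2_pairwise_fst v)
  have hLeq : vsorted.map Prod.fst = L2 := by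
    refine List.Perm.eq_of_pairwise ?_ hpwL1 hpwL2 (hpermL1.trans hpermL2.symm)
    intro a b _ _ h1 h2; omega
  have hlen : (vsorted.length : Int) = (S.length : Int) := by
    have := (PySem.List.sorted2_perm v (·.1) (·.2) false).length_eq
    rw [this, hvdef, List.length_map]
  rw [hA, hB, hLeq, hlen]

-- ===== VERDICT (by name: the statement is the Claim_ definition above) =====
theorem distinctIds_spec : Claim_equal_distinctIds := by
  intro arr mi _
  unfold Spec_distinctIds
  exact pvMain arr mi
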